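-- pv_equiv track=rewrite | github.com/mark-dingwall/apples-to-apples | scraper/stores/store_a.py | _parse_price_text
-- ===== SOURCE A (Python) =====
-- def _parse_price_text(price_text: str) -> tuple[str, str]:
--     """
--     Parse price text to extract main price and unit price.
--     Store A often shows prices like "$5.50 $1.10 per 100g"
--     """
--     lines = price_text.strip().split("\n")
--     price = ""
--     unit_price = ""
--
--     for line in lines:
--         line = line.strip()
--         if not line:
--             continue
--
--         # First price-like value is usually the main price
--         if not price and "$" in line:
--             price = line
--         # Lines containing "per" are unit prices
--         elif "per" in line.lower():
--             unit_price = line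
--         # If we have price but this line also has $, might be unit price
--         elif price and "$" in line and not unit_price:
--             unit_price = line
--
--     return price, unit_price
-- ===== SOURCE B (Python) =====
-- def _parse_price_text(price_text: str) -> tuple[str, str]:
--     lines = [l for l in (raw.strip() for raw in price_text.strip().split("\n")) if l]
--     price_idx = next((i for i, l in enumerate(lines) if "$" in l), None)
--     price = lines[price_idx] if price_idx is not None else ""
--     others = lines if price_idx is None else lines[:price_idx] + lines[price_idx + 1:]
--     per_lines = [l for l in others if "per" in l.lower()]
--     if per_lines:
--         unit_price = per_lines[-1]
--     elif price_idx is not None: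
--         unit_price = next((l for l in lines[price_idx + 1:] if "$" in l), "")
--     else:
--         unit_price = ""
--     return price, unit_price
-- ===== Notes on version B (the rewrite author's own statement) =====
-- stated objective: simpler
-- what changed: Replaces A's single stateful fold (mutable price/unit_price flags with an elif chain) by a direct decomposition: clean the lines once, locate the price as the first dollar-sign line, then compute the unit price independently as the last per-marked line among the other lines, falling back to the first dollar-sign line after the price line.
import Mathlib
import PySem

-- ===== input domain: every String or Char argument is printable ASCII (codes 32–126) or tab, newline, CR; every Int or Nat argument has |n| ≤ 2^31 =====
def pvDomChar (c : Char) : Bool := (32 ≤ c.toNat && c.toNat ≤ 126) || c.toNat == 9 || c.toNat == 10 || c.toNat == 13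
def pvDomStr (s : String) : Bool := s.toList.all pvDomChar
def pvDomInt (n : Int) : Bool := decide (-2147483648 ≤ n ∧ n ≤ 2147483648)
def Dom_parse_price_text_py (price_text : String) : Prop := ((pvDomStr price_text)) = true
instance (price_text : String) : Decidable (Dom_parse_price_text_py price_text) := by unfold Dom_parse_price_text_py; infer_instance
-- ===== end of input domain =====

-- B replaces A's stateful accumulator loop with a direct decomposition (find price line, then
-- independently pick unit-price line); same cost, plainer structure. Equal return values proved below.

-- "$" in line
def pvHasDollar (line : String) : Bool := PySem.Str.isIn "$" line
-- "per" in line.lower()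
def pvHasPer (line : String) : Bool := PySem.Str.isIn "per" (PySem.Str.lower line)

-- ===== PORT A =====
def parse_price_text_py (price_text : String) : String × String :=
  let lines := (PySem.Str.split? (PySem.Str.strip price_text) "\n").getD []
  lines.foldl (fun (st : String × String) rawLine =>
      let line := PySem.Str.strip rawLine
      if line = "" then st
      else if st.1 = "" ∧ pvHasDollar line = true then (line, st.2)
      else if pvHasPer line = true then (st.1, line)
      else if st.1 ≠ "" ∧ pvHasDollar line = true ∧ st.2 = "" then (st.1, line)
      else st) ("", "")

-- ===== PORT B =====
def parse_price_text_py_alt (price_text : String) : String × String :=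
  let lines := (((PySem.Str.split? (PySem.Str.strip price_text) "\n").getD []).map PySem.Str.strip).filter (fun l => !(l == ""))
  let idx? := lines.findIdx? pvHasDollar
  let price := match idx? with
    | some i => lines.getD i ""
    | none => ""
  let others := match idx? with
    | some i => lines.take i ++ lines.drop (i + 1)   -- lines[:i] + lines[i+1:], exact for 0 ≤ i
    | none => lines
  let perLines := others.filter pvHasPer
  let unit := match perLines.getLast? with
    | some x => x
    | none =>
      match idx? with
      | some i => ((lines.drop (i + 1)).find? pvHasDollar).getD ""
      | none => ""
  (price, unit)

-- ===== PRECONDITION & SPEC =====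
def Spec_parse_price_text_py (price_text : String) (out : String × String) : Prop := out = parse_price_text_py_alt price_text
instance (price_text : String) (out : String × String) : Decidable (Spec_parse_price_text_py price_text out) := by unfold Spec_parse_price_text_py; infer_instance

-- ===== CLAIM (what is proved, stated in full; the proofs are below) =====
def Claim_equal_parse_price_text_py : Prop := ∀ (price_text : String), Dom_parse_price_text_py price_text → Spec_parse_price_text_py price_text (parse_price_text_py price_text)

-- ===== LEMMAS AND PROOFS =====

-- the loop body of A, on an already-stripped nonempty line
def pvStep (st : String × String) (line : String) : String × String :=
  if st.1 = "" ∧ pvHasDollar line = true then (line, st.2)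
  else if pvHasPer line = true then (st.1, line)
  else if st.1 ≠ "" ∧ pvHasDollar line = true ∧ st.2 = "" then (st.1, line)
  else st

lemma pv_getLast?_cons_or {α : Type} (a : α) (xs : List α) :
    (a :: xs).getLast? = xs.getLast?.or (some a) := by
  induction xs generalizing a with
  | nil => rfl
  | cons b ys ih => rw [List.getLast?_cons_cons, ih b]; cases ys.getLast? <;> simp

lemma pv_or_getD {α : Type} (o : Option α) (a d : α) : (o.or (some a)).getD d = o.getD a := by
  cases o <;> rfl

lemma pvHasPer_ne_empty {l : String} (h : pvHasPer l = true) : l ≠ "" := by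
  rintro rfl; exact absurd h (by decide)

lemma pvHasDollar_ne_empty {l : String} (h : pvHasDollar l = true) : l ≠ "" := by
  rintro rfl; exact absurd h (by decide)

-- A's raw fold equals the fold of pvStep over the cleaned lines
lemma pv_fold_clean (raws : List String) (st : String × String) :
    raws.foldl (fun st rawLine =>
      let line := PySem.Str.strip rawLine
      if line = "" then st
      else if st.1 = "" ∧ pvHasDollar line = true then (line, st.2)
      else if pvHasPer line = true then (st.1, line)
      else if st.1 ≠ "" ∧ pvHasDollar line = true ∧ st.2 = "" then (st.1, line)
      else st) st
    = ((raws.map PySem.Str.strip).filter (fun l => !(l == ""))).foldl pvStep st := by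
  induction raws generalizing st with
  | nil => rfl
  | cons r rs ih =>
    simp only [List.foldl_cons, List.map_cons, List.filter_cons]
    by_cases h : PySem.Str.strip r = ""
    · simp [h, ih]
    · simp [h, ih, pvStep]

-- fold after the price has been found
lemma pv_fold_post (ls : List String) (p u : String) (hp : p ≠ "") :
    ls.foldl pvStep (p, u)
      = (p, ((ls.filter pvHasPer).getLast?).getD
            (if u = "" then ((ls.find? pvHasDollar).getD "") else u)) := by
  induction ls generalizing u with
  | nil => simp
  | cons l ls ih =>
    simp only [List.foldl_cons, List.filter_cons, List.find?_cons]
    by_cases hper : pvHasPer l = true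
    · have hl := pvHasPer_ne_empty hper
      have : pvStep (p, u) l = (p, l) := by simp [pvStep, hp, hper]
      rw [this, ih]
      simp only [hper, if_pos]
      rw [pv_getLast?_cons_or]; cases (ls.filter pvHasPer).getLast? <;> simp [hl]
    · by_cases hd : pvHasDollar l = true
      · have hl := pvHasDollar_ne_empty hd
        by_cases hu : u = ""
        · have : pvStep (p, u) l = (p, l) := by simp [pvStep, hp, hper, hd, hu]
          rw [this, ih]
          simp [hper, hd, hu, hl]
        · have : pvStep (p, u) l = (p, u) := by simp [pvStep, hp, hper, hd, hu]
          rw [this, ih]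
          simp [hper, hu]
      · have : pvStep (p, u) l = (p, u) := by
          simp [pvStep, hp, hper, hd]
        rw [this, ih]
        simp [hper, hd]

-- fold before any price has been found, full characterisation
lemma pv_fold_pre (ls : List String) (u : String) :
    ls.foldl pvStep ("", u)
      = match ls.findIdx? pvHasDollar with
        | none => ("", ((ls.filter pvHasPer).getLast?).getD u)
        | some i =>
          (ls.getD i "",
            ((((ls.take i ++ ls.drop (i + 1)).filter pvHasPer).getLast?).getD
              (if u = "" then (((ls.drop (i + 1)).find? pvHasDollar).getD "") else u))) := by
  induction ls generalizing u with
  | nil => simp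
  | cons l ls ih =>
    simp only [List.foldl_cons]
    by_cases hd : pvHasDollar l = true
    · have hl := pvHasDollar_ne_empty hd
      have : pvStep ("", u) l = (l, u) := by simp [pvStep, hd]
      rw [this, pv_fold_post ls l u hl]
      simp [List.findIdx?_cons, hd]
    · by_cases hper : pvHasPer l = true
      · have hl := pvHasPer_ne_empty hper
        have : pvStep ("", u) l = ("", l) := by simp [pvStep, hd, hper]
        rw [this, ih]
        simp only [List.findIdx?_cons, hd, Bool.false_eq_true, if_false]
        cases hidx : ls.findIdx? pvHasDollar with
        | none =>
          simp only [Option.map_none]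
          simp only [List.filter_cons, hper, if_pos]
          rw [pv_getLast?_cons_or]; cases (ls.filter pvHasPer).getLast? <;> simp
        | some i =>
          simp only [Option.map_some, List.take_succ_cons, List.drop_succ_cons,
            List.cons_append, List.getD_cons_succ, List.filter_cons, hper, if_pos,
            pv_getLast?_cons_or, pv_or_getD]
          rw [if_neg hl]
      · have : pvStep ("", u) l = ("", u) := by simp [pvStep, hd, hper]
        rw [this, ih]
        simp only [List.findIdx?_cons, hd, Bool.false_eq_true, if_false]
        cases hidx : ls.findIdx? pvHasDollar with
        | none => simp [hper]
        | some i =>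
          simp [List.take_succ_cons, List.drop_succ_cons, hper]

-- ===== VERDICT (by name: the statement is the Claim_ definition above) =====
theorem parse_price_text_py_spec : Claim_equal_parse_price_text_py := by
  intro price_text _
  unfold Spec_parse_price_text_py parse_price_text_py parse_price_text_py_alt
  rw [pv_fold_clean, pv_fold_pre]
  cases h : (((PySem.Str.split? (PySem.Str.strip price_text) "\n").getD []).map
      PySem.Str.strip |>.filter (fun l => !(l == ""))).findIdx? pvHasDollar with
  | none =>
    simp only [h]
    cases hgl : ((((PySem.Str.split? (PySem.Str.strip price_text) "\n").getD []).map
        PySem.Str.strip |>.filter (fun l => !(l == ""))).filter pvHasPer).getLast? <;>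
      simp only [Option.getD_some, Option.getD_none]
  | some i =>
    simp only [h]
    cases hgl : (((((PySem.Str.split? (PySem.Str.strip price_text) "\n").getD []).map
        PySem.Str.strip |>.filter (fun l => !(l == ""))).take i ++
        ((((PySem.Str.split? (PySem.Str.strip price_text) "\n").getD []).map
        PySem.Str.strip |>.filter (fun l => !(l == ""))).drop (i + 1))).filter pvHasPer).getLast? <;>
      simp only [Option.getD_some, Option.getD_none, if_true]
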